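-- pv_equiv track=rewrite | github.com/rubyddong82/comp3011-cw1 | newest_demo/rewrite_project_v2/server/db.py | _normalize_declared_type
-- ===== SOURCE A (Python) =====
-- def _normalize_declared_type(declared_type: str) -> str:
--     raw = (declared_type or "").strip().upper()
--     if "INT" in raw:
--         return "INTEGER"
--     if any(token in raw for token in ("REAL", "FLOA", "DOUB")):
--         return "REAL"
--     if any(token in raw for token in ("NUMERIC", "DECIMAL")):
--         return "NUMERIC"
--     if any(token in raw for token in ("CHAR", "CLOB", "TEXT", "VARCHAR")):
--         return "TEXT"
--     return "TEXT" if raw == "" else raw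
-- ===== SOURCE B (Python) =====
-- # B: one sweep over suffix positions computing the MINIMUM category rank via a
-- # token->rank dictionary (VARCHAR omitted: any hit of VARCHAR is a hit of CHAR),
-- # instead of A's four sequential any-substring passes over the whole string.
-- _RANK = {
--     "INT": 0,
--     "REAL": 1, "FLOA": 1, "DOUB": 1,
--     "NUMERIC": 2, "DECIMAL": 2,
--     "CHAR": 3, "CLOB": 3, "TEXT": 3,
-- }
-- _CANON = ("INTEGER", "REAL", "NUMERIC", "TEXT")
--
-- def _normalize_declared_type(declared_type: str) -> str:
--     raw = (declared_type or "").strip().upper()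
--     best = 4
--     for i in range(len(raw)):
--         suffix = raw[i:]
--         for token, rank in _RANK.items():
--             if rank < best and suffix.startswith(token):
--                 best = rank
--     if best < 4:
--         return _CANON[best]
--     return "TEXT" if raw == "" else raw
-- ===== Notes on version B (the rewrite author's own statement) =====
-- stated objective: alternative
-- what changed: Instead of four sequential any-substring tests, B makes one sweep over the suffix positions of the stripped uppercased string, taking the minimum category rank from a token-to-rank dictionary checked with startswith (VARCHAR dropped as subsumed by CHAR), and maps the minimum rank to its canonical name.
import Mathlib
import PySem

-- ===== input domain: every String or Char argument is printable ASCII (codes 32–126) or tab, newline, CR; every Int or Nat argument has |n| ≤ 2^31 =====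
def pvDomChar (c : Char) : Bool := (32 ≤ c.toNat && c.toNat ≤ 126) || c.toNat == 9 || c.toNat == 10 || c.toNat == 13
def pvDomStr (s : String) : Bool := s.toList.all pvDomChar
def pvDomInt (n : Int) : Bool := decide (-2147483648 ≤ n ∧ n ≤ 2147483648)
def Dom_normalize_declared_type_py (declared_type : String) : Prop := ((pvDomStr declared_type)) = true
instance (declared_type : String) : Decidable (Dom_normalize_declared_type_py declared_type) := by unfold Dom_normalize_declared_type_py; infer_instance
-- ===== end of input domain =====

-- B changes the algorithm: one sweep over suffix positions taking the minimum category
-- rank from a token→rank dictionary, instead of A's four sequential any-substring tests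
-- (objective: alternative decomposition; same asymptotic cost, no speed claim).

-- ===== PORT A =====
-- Literal port of A: chain of substring tests on the stripped, uppercased input.
def normalize_declared_type_py (declared_type : String) : String :=
  let raw := PySem.Str.upper (PySem.Str.strip declared_type)
  if PySem.Str.isIn "INT" raw then "INTEGER"
  else if ["REAL", "FLOA", "DOUB"].any (fun t => PySem.Str.isIn t raw) then "REAL"
  else if ["NUMERIC", "DECIMAL"].any (fun t => PySem.Str.isIn t raw) then "NUMERIC"
  else if ["CHAR", "CLOB", "TEXT", "VARCHAR"].any (fun t => PySem.Str.isIn t raw) then "TEXT"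
  else if raw = "" then "TEXT" else raw

-- ===== PORT B =====
-- _RANK of Source B (a dict with distinct literal keys = this association list, in order;
-- VARCHAR is absent: any VARCHAR hit is a CHAR hit).
def ndtRank : List (List Char × Nat) :=
  [("INT".toList, 0),
   ("REAL".toList, 1), ("FLOA".toList, 1), ("DOUB".toList, 1),
   ("NUMERIC".toList, 2), ("DECIMAL".toList, 2),
   ("CHAR".toList, 3), ("CLOB".toList, 3), ("TEXT".toList, 3)]

-- inner loop of Source B: for token, rank in _RANK.items(): if rank < best and suffix.startswith(token): best = rank
def ndtInner (suffix : List Char) (l : List (List Char × Nat)) (best : Nat) : Nat :=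
  l.foldl (fun b tp => if tp.2 < b && PySem.Chars.startswith suffix tp.1 then tp.2 else b) best

def normalize_declared_type_py_alt (declared_type : String) : String :=
  let raw := PySem.Str.upper (PySem.Str.strip declared_type)
  let rl := raw.toList
  let best := (List.range rl.length).foldl (fun b i => ndtInner (rl.drop i) ndtRank b) 4
  if best < 4 then ["INTEGER", "REAL", "NUMERIC", "TEXT"].getD best "TEXT"
  else if raw = "" then "TEXT" else raw

-- ===== PRECONDITION & SPEC =====
def Spec_normalize_declared_type_py (declared_type : String) (out : String) : Prop := out = normalize_declared_type_py_alt declared_type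
instance (declared_type : String) (out : String) : Decidable (Spec_normalize_declared_type_py declared_type out) := by unfold Spec_normalize_declared_type_py; infer_instance

-- ===== CLAIM (what is proved, stated in full; the proofs are below) =====
def Claim_equal_normalize_declared_type_py : Prop := ∀ (declared_type : String), Dom_normalize_declared_type_py declared_type → Spec_normalize_declared_type_py declared_type (normalize_declared_type_py declared_type)

-- ===== LEMMAS AND PROOFS =====

-- the inner fold only decreases its accumulator
theorem ndtInner_le_init (suffix : List Char) (l : List (List Char × Nat)) (b : Nat) :
    ndtInner suffix l b ≤ b := by
  induction l generalizing b with
  | nil => simp [ndtInner]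
  | cons tp rest ih =>
    simp only [ndtInner, List.foldl_cons]
    split_ifs with h
    · exact le_trans (ih tp.2) (by simp at h; omega)
    · exact ih b

-- the inner fold is ≤ the rank of any matching entry
theorem ndtInner_le_mem (suffix : List Char) (l : List (List Char × Nat)) (b : Nat)
    (tp : List Char × Nat) (hm : tp ∈ l) (hs : PySem.Chars.startswith suffix tp.1 = true) :
    ndtInner suffix l b ≤ tp.2 := by
  induction l generalizing b with
  | nil => simp at hm
  | cons hd rest ih =>
    simp only [ndtInner, List.foldl_cons]
    rcases List.mem_cons.mp hm with h | h
    · subst h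
      have hle : (if tp.2 < b && PySem.Chars.startswith suffix tp.1 then tp.2 else b) ≤ tp.2 := by
        split_ifs with hc
        · exact le_rfl
        · simp [hs] at hc; omega
      exact le_trans (ndtInner_le_init suffix rest _) hle
    · exact ih _ h

-- the inner fold result is the initial value or the rank of a matching entry
theorem ndtInner_ach (suffix : List Char) (l : List (List Char × Nat)) (b : Nat) :
    ndtInner suffix l b = b ∨
      ∃ tp ∈ l, PySem.Chars.startswith suffix tp.1 = true ∧ ndtInner suffix l b = tp.2 := by
  induction l generalizing b with
  | nil => left; simp [ndtInner]
  | cons hd rest ih =>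
    simp only [ndtInner, List.foldl_cons]
    rcases ih (if hd.2 < b && PySem.Chars.startswith suffix hd.1 then hd.2 else b) with h | ⟨tp, htp, hs, he⟩
    · simp only [ndtInner] at h
      rw [h]
      split_ifs with hc
      · right
        refine ⟨hd, List.mem_cons_self, ?_, rfl⟩
        simpa using (Bool.and_eq_true _ _ |>.mp hc).2
      · left; rfl
    · right
      simp only [ndtInner] at he
      exact ⟨tp, List.mem_cons_of_mem _ htp, hs, he⟩

-- the outer fold only decreases its accumulator
theorem ndtOuter_le_init (rl : List Char) (is : List Nat) (b : Nat) :
    is.foldl (fun b i => ndtInner (rl.drop i) ndtRank b) b ≤ b := by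
  induction is generalizing b with
  | nil => simp
  | cons j rest ih =>
    simp only [List.foldl_cons]
    exact le_trans (ih _) (ndtInner_le_init _ _ _)

-- the outer fold is ≤ the rank of any entry matching at any visited position
theorem ndtOuter_le_mem (rl : List Char) (is : List Nat) (b : Nat) (i : Nat) (hi : i ∈ is)
    (tp : List Char × Nat) (hm : tp ∈ ndtRank)
    (hs : PySem.Chars.startswith (rl.drop i) tp.1 = true) :
    is.foldl (fun b i => ndtInner (rl.drop i) ndtRank b) b ≤ tp.2 := by
  induction is generalizing b with
  | nil => simp at hi
  | cons j rest ih =>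
    simp only [List.foldl_cons]
    rcases List.mem_cons.mp hi with h | h
    · subst h
      exact le_trans (ndtOuter_le_init rl rest _) (ndtInner_le_mem _ _ _ tp hm hs)
    · exact ih _ h

-- the outer fold result is the initial value or an achieved matching rank
theorem ndtOuter_ach (rl : List Char) (is : List Nat) (b : Nat) :
    is.foldl (fun b i => ndtInner (rl.drop i) ndtRank b) b = b ∨
      ∃ i ∈ is, ∃ tp ∈ ndtRank, PySem.Chars.startswith (rl.drop i) tp.1 = true ∧
        is.foldl (fun b i => ndtInner (rl.drop i) ndtRank b) b = tp.2 := by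
  induction is generalizing b with
  | nil => left; simp
  | cons j rest ih =>
    simp only [List.foldl_cons]
    rcases ih (ndtInner (rl.drop j) ndtRank b) with h | ⟨i, hi, tp, htp, hs, he⟩
    · rw [h]
      rcases ndtInner_ach (rl.drop j) ndtRank b with h2 | ⟨tp, htp, hs, he⟩
      · left; exact h2
      · right; exact ⟨j, List.mem_cons_self, tp, htp, hs, he⟩
    · right; exact ⟨i, List.mem_cons_of_mem _ hi, tp, htp, hs, he⟩

-- a nonempty token matches at some position < length iff it is a substring
theorem ndt_bridge (rl t : List Char) (ht : t ≠ []) :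
    (∃ i ∈ List.range rl.length, PySem.Chars.startswith (rl.drop i) t = true) ↔
      PySem.Chars.isIn t rl = true := by
  constructor
  · rintro ⟨i, _, hs⟩
    exact (PySem.Chars.exists_prefix_drop_iff_isIn _ _).mp ⟨i, (PySem.Chars.startswith_iff _ _).mp hs⟩
  · intro h
    obtain ⟨j, hj⟩ := (PySem.Chars.exists_prefix_drop_iff_isIn _ _).mpr h
    have hjlt : j < rl.length := by
      by_contra hge
      have : rl.drop j = [] := List.drop_eq_nil_of_le (by omega)
      rw [this] at hj
      exact ht (List.prefix_nil.mp hj)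
    exact ⟨j, List.mem_range.mpr hjlt, (PySem.Chars.startswith_iff _ _).mpr hj⟩

-- VARCHAR hit implies CHAR hit
theorem ndt_varchar_char (rl : List Char) (h : PySem.Chars.isIn "VARCHAR".toList rl = true) :
    PySem.Chars.isIn "CHAR".toList rl = true := by
  rw [PySem.Chars.isIn_iff_infix] at *
  exact List.IsInfix.trans (by decide) h

-- core characterization: the minimum-rank sweep equals A's chain of substring tests
set_option maxHeartbeats 1000000 in
theorem ndt_core (rl : List Char) :
    ((List.range rl.length).foldl (fun b i => ndtInner (rl.drop i) ndtRank b) 4 : Nat) =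
      (if PySem.Chars.isIn "INT".toList rl then 0
       else if PySem.Chars.isIn "REAL".toList rl || (PySem.Chars.isIn "FLOA".toList rl || PySem.Chars.isIn "DOUB".toList rl) then 1
       else if PySem.Chars.isIn "NUMERIC".toList rl || PySem.Chars.isIn "DECIMAL".toList rl then 2
       else if PySem.Chars.isIn "CHAR".toList rl || (PySem.Chars.isIn "CLOB".toList rl || PySem.Chars.isIn "TEXT".toList rl) then 3
       else 4) := by
  set m := (List.range rl.length).foldl (fun b i => ndtInner (rl.drop i) ndtRank b) 4 with hm
  -- m ≤ p whenever a token of rank p is a substring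
  have hle : ∀ tp ∈ ndtRank, PySem.Chars.isIn tp.1 rl = true → m ≤ tp.2 := by
    intro tp htp hin
    have ht : tp.1 ≠ [] := by
      simp only [ndtRank, List.mem_cons, List.not_mem_nil, or_false] at htp
      rcases htp with h|h|h|h|h|h|h|h|h <;> subst h <;> decide
    obtain ⟨i, hi, hs⟩ := (ndt_bridge rl tp.1 ht).mpr hin
    exact ndtOuter_le_mem rl _ 4 i hi tp htp hs
  -- m is 4 or an achieved rank whose token group is a substring
  have hach : m = 4 ∨
      (m = 0 ∧ PySem.Chars.isIn "INT".toList rl = true) ∨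
      (m = 1 ∧ (PySem.Chars.isIn "REAL".toList rl = true ∨ PySem.Chars.isIn "FLOA".toList rl = true ∨ PySem.Chars.isIn "DOUB".toList rl = true)) ∨
      (m = 2 ∧ (PySem.Chars.isIn "NUMERIC".toList rl = true ∨ PySem.Chars.isIn "DECIMAL".toList rl = true)) ∨
      (m = 3 ∧ (PySem.Chars.isIn "CHAR".toList rl = true ∨ PySem.Chars.isIn "CLOB".toList rl = true ∨ PySem.Chars.isIn "TEXT".toList rl = true)) := by
    rcases ndtOuter_ach rl (List.range rl.length) 4 with h | ⟨i, hi, tp, htp, hs, he⟩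
    · left; exact h
    · have hin : PySem.Chars.isIn tp.1 rl = true :=
        (PySem.Chars.exists_prefix_drop_iff_isIn _ _).mp ⟨i, (PySem.Chars.startswith_iff _ _).mp hs⟩
      rw [← hm] at he
      simp only [ndtRank, List.mem_cons, List.not_mem_nil, or_false] at htp
      rcases htp with h|h|h|h|h|h|h|h|h <;> subst h <;> tauto
  by_cases hI : PySem.Chars.isIn "INT".toList rl = true
  · have h0 : m = 0 := Nat.le_zero.mp (hle ("INT".toList, 0) (by decide) hI)
    rw [if_pos hI, h0]
  · rw [if_neg hI]
    by_cases hR : (PySem.Chars.isIn "REAL".toList rl || (PySem.Chars.isIn "FLOA".toList rl || PySem.Chars.isIn "DOUB".toList rl)) = true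
    · have h1 : m ≤ 1 := by
        rcases Bool.or_eq_true _ _ |>.mp hR with h | h
        · exact hle ("REAL".toList, 1) (by decide) h
        · rcases Bool.or_eq_true _ _ |>.mp h with h | h
          · exact hle ("FLOA".toList, 1) (by decide) h
          · exact hle ("DOUB".toList, 1) (by decide) h
      have hm1 : m = 1 := by
        rcases hach with h|⟨h,hin⟩|⟨h,_⟩|⟨h,_⟩|⟨h,_⟩ <;> first | omega | exact absurd hin hI
      rw [if_pos hR, hm1]
    · rw [if_neg hR]
      have hR' : ¬ (PySem.Chars.isIn "REAL".toList rl = true ∨ PySem.Chars.isIn "FLOA".toList rl = true ∨ PySem.Chars.isIn "DOUB".toList rl = true) := by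
        simp only [Bool.or_eq_true] at hR; tauto
      by_cases hN : (PySem.Chars.isIn "NUMERIC".toList rl || PySem.Chars.isIn "DECIMAL".toList rl) = true
      · have h2 : m ≤ 2 := by
          rcases Bool.or_eq_true _ _ |>.mp hN with h | h
          · exact hle ("NUMERIC".toList, 2) (by decide) h
          · exact hle ("DECIMAL".toList, 2) (by decide) h
        have hm2 : m = 2 := by
          rcases hach with h|⟨h,hin⟩|⟨h,hin⟩|⟨h,_⟩|⟨h,_⟩ <;>
            first | omega | exact absurd hin hI | exact absurd hin hR'
        rw [if_pos hN, hm2]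
      · rw [if_neg hN]
        have hN' : ¬ (PySem.Chars.isIn "NUMERIC".toList rl = true ∨ PySem.Chars.isIn "DECIMAL".toList rl = true) := by
          simp only [Bool.or_eq_true] at hN; tauto
        by_cases hT : (PySem.Chars.isIn "CHAR".toList rl || (PySem.Chars.isIn "CLOB".toList rl || PySem.Chars.isIn "TEXT".toList rl)) = true
        · have h3 : m ≤ 3 := by
            rcases Bool.or_eq_true _ _ |>.mp hT with h | h
            · exact hle ("CHAR".toList, 3) (by decide) h
            · rcases Bool.or_eq_true _ _ |>.mp h with h | h
              · exact hle ("CLOB".toList, 3) (by decide) h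
              · exact hle ("TEXT".toList, 3) (by decide) h
          have hm3 : m = 3 := by
            rcases hach with h|⟨h,hin⟩|⟨h,hin⟩|⟨h,hin⟩|⟨h,_⟩ <;>
              first | omega | exact absurd hin hI | exact absurd hin hR' | exact absurd hin hN'
          rw [if_pos hT, hm3]
        · rw [if_neg hT]
          have hT' : ¬ (PySem.Chars.isIn "CHAR".toList rl = true ∨ PySem.Chars.isIn "CLOB".toList rl = true ∨ PySem.Chars.isIn "TEXT".toList rl = true) := by
            simp only [Bool.or_eq_true] at hT; tauto
          rcases hach with h|⟨h,hin⟩|⟨h,hin⟩|⟨h,hin⟩|⟨h,hin⟩ <;>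
            first | exact h | exact absurd hin hI | exact absurd hin hR' | exact absurd hin hN' | exact absurd hin hT'

-- ===== VERDICT (by name: the statement is the Claim_ definition above) =====
set_option maxHeartbeats 1000000 in
theorem normalize_declared_type_py_spec : Claim_equal_normalize_declared_type_py := by
  intro s _
  show normalize_declared_type_py s = normalize_declared_type_py_alt s
  simp only [normalize_declared_type_py, normalize_declared_type_py_alt,
    List.any_cons, List.any_nil, Bool.or_false, PySem.Str.isIn_eq]
  rw [ndt_core]
  by_cases hI : PySem.Chars.isIn "INT".toList (PySem.Str.upper (PySem.Str.strip s)).toList = true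
  · rw [if_pos hI, if_pos hI]
    rfl
  · rw [if_neg hI, if_neg hI]
    by_cases hR : (PySem.Chars.isIn "REAL".toList (PySem.Str.upper (PySem.Str.strip s)).toList || (PySem.Chars.isIn "FLOA".toList (PySem.Str.upper (PySem.Str.strip s)).toList || PySem.Chars.isIn "DOUB".toList (PySem.Str.upper (PySem.Str.strip s)).toList)) = true
    · rw [if_pos hR, if_pos hR]
      rfl
    · rw [if_neg hR, if_neg hR]
      by_cases hN : (PySem.Chars.isIn "NUMERIC".toList (PySem.Str.upper (PySem.Str.strip s)).toList || PySem.Chars.isIn "DECIMAL".toList (PySem.Str.upper (PySem.Str.strip s)).toList) = true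
      · rw [if_pos hN, if_pos hN]
        rfl
      · rw [if_neg hN, if_neg hN]
        by_cases hT : (PySem.Chars.isIn "CHAR".toList (PySem.Str.upper (PySem.Str.strip s)).toList || (PySem.Chars.isIn "CLOB".toList (PySem.Str.upper (PySem.Str.strip s)).toList || PySem.Chars.isIn "TEXT".toList (PySem.Str.upper (PySem.Str.strip s)).toList)) = true
        · rw [if_pos (show _ = true by
              rcases Bool.or_eq_true _ _ |>.mp hT with h | h
              · simp only [h, Bool.true_or]
              · rcases Bool.or_eq_true _ _ |>.mp h with h | h
                · simp only [h, Bool.true_or, Bool.or_true]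
                · simp only [h, Bool.true_or, Bool.or_true]),
            if_pos hT]
          rfl
        · simp only [Bool.or_eq_true, not_or, Bool.not_eq_true] at hT
          have hV : PySem.Chars.isIn "VARCHAR".toList (PySem.Str.upper (PySem.Str.strip s)).toList = false := by
            rcases h : PySem.Chars.isIn "VARCHAR".toList (PySem.Str.upper (PySem.Str.strip s)).toList
            · rfl
            · have hc := ndt_varchar_char _ h
              rw [hT.1] at hc
              exact absurd hc Bool.false_ne_true
          rw [if_neg (show ¬ _ = true by simp only [hT.1, hT.2.1, hT.2.2, hV, Bool.or_self]; exact Bool.false_ne_true),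
            if_neg (show ¬ _ = true by simp only [hT.1, hT.2.1, hT.2.2, Bool.or_self]; exact Bool.false_ne_true)]
          rfl
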